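-- pv_equiv track=rewrite | github.com/lerastromtsova/Scrapy-Top-News | utils.py | intersection_with_substrings
-- ===== SOURCE A (Python) =====
-- def intersection_with_substrings(set1, set2):
--     result_set = set()
--     for item1 in set1:
--         for item2 in set2:
--             if item1 == item2:
--                 result_set.add(item1)
--             elif item1 in item2.split():
--                 result_set.add(item2)
--             elif item2 in item1.split():
--                 result_set.add(item1)
--     return result_set
-- ===== SOURCE B (Python) =====
-- def _match(item1, item2):
--     if item1 == item2:
--         return item1
--     if item1 in item2.split():
--         return item2
--     if item2 in item1.split():
--         return item1
--     return None
--
--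
-- def intersection_with_substrings(set1, set2):
--     # Inverted indexes over set2: value -> positions, token -> positions.
--     items2 = list(set2)
--     val_pos = {}
--     for p, item2 in enumerate(items2):
--         val_pos.setdefault(item2, []).append(p)
--     tok_pos = {}
--     for p, item2 in enumerate(items2):
--         for t in item2.split():
--             tok_pos.setdefault(t, []).append(p)
--     result_set = set()
--     for item1 in set1:
--         # candidate positions in set2 that can possibly match item1
--         cand = set(tok_pos.get(item1, []))
--         cand.update(val_pos.get(item1, []))
--         for t in item1.split():
--             cand.update(val_pos.get(t, []))
--         for p in sorted(cand):
--             m = _match(item1, items2[p])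
--             if m is not None:
--                 result_set.add(m)
--     return result_set
-- ===== Notes on version B (the rewrite author's own statement) =====
-- stated objective: faster
-- what changed: Replaces the all-pairs nested scan (re-splitting both strings for every pair) with two inverted indexes built in one pass over set2 (value->positions and token->positions); each item1 then only visits its looked-up candidate positions in sorted order instead of scanning all of set2.
import Mathlib
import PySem

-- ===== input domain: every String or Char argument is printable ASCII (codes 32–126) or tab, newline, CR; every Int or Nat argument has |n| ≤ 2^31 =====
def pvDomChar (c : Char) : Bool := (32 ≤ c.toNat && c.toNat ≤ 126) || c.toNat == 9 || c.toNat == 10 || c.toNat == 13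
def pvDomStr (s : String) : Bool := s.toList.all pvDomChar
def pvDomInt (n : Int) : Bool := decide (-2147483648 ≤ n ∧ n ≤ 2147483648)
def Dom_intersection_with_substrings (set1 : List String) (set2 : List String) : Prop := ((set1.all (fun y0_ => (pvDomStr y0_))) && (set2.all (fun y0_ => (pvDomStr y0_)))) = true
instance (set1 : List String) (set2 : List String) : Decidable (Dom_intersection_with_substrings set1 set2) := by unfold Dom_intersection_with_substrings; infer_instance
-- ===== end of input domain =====

-- B replaces A's all-pairs nested scan by inverted indexes over set2 (value->positions,
-- token->positions): per item1 only the looked-up candidate positions are visited, in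
-- sorted order; measurably faster when matches are sparse.

-- ===== PORT A =====
def intersection_with_substrings (set1 : List String) (set2 : List String) : List String :=
  set1.foldl (fun result_set item1 =>
    set2.foldl (fun result_set item2 =>
      if item1 == item2 then PySem.Set.add result_set item1
      else if (PySem.Str.split₀ item2).contains item1 then PySem.Set.add result_set item2
      else if (PySem.Str.split₀ item1).contains item2 then PySem.Set.add result_set item1
      else result_set) result_set) PySem.Set.empty

-- ===== PORT B =====
-- the match rule for one pair: the value added for (item1, item2), if any
def pvMatch (item1 item2 : String) : Option String :=
  if item1 == item2 then some item1
  else if (PySem.Str.split₀ item2).contains item1 then some item2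
  else if (PySem.Str.split₀ item1).contains item2 then some item1
  else none

-- val_pos : value -> positions in set2 holding that value (built with setdefault/append)
def pvValPos (set2 : List String) : PySem.Dict String (List Int) :=
  (PySem.List.enumerate set2).foldl
    (fun d q => d.modify q.2 [] (fun l => l ++ [q.1])) PySem.Dict.empty

-- tok_pos : token -> positions in set2 whose element's split() contains that token
def pvTokPos (set2 : List String) : PySem.Dict String (List Int) :=
  (PySem.List.enumerate set2).foldl
    (fun d q => (PySem.Str.split₀ q.2).foldl
      (fun d t => d.modify t [] (fun l => l ++ [q.1])) d) PySem.Dict.empty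

def intersection_with_substrings_alt (set1 : List String) (set2 : List String) : List String :=
  let val_pos := pvValPos set2
  let tok_pos := pvTokPos set2
  set1.foldl (fun result_set item1 =>
    let cand0 : PySem.Set Int := PySem.Set.ofList (tok_pos.getD item1 [])
    let cand1 : PySem.Set Int := PySem.Set.update cand0 (val_pos.getD item1 [])
    let cand : PySem.Set Int := (PySem.Str.split₀ item1).foldl
      (fun s t => PySem.Set.update s (val_pos.getD t [])) cand1
    (PySem.List.sorted cand (fun x => x)).foldl (fun result_set p =>
      match pvMatch item1 (PySem.List.pyGetD set2 p "") with
      | some m => PySem.Set.add result_set m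
      | none => result_set) result_set) PySem.Set.empty

-- ===== PRECONDITION & SPEC =====
def Spec_intersection_with_substrings (set1 : List String) (set2 : List String) (out : List String) : Prop := out = intersection_with_substrings_alt set1 set2
instance (set1 : List String) (set2 : List String) (out : List String) : Decidable (Spec_intersection_with_substrings set1 set2 out) := by unfold Spec_intersection_with_substrings; infer_instance

-- ===== CLAIM (what is proved, stated in full; the proofs are below) =====
def Claim_equal_intersection_with_substrings : Prop := ∀ (set1 : List String) (set2 : List String), Dom_intersection_with_substrings set1 set2 → Spec_intersection_with_substrings set1 set2 (intersection_with_substrings set1 set2)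

-- ===== LEMMAS AND PROOFS =====

-- the branch-chain fold (over any carrier of strings) is Set.add folded over the pvMatch stream
lemma pv_foldl_branch {β : Type} (i1 : String) (h : β → String) :
    ∀ (l : List β) (acc : PySem.Set String),
      l.foldl (fun a x =>
        if i1 == h x then PySem.Set.add a i1
        else if (PySem.Str.split₀ (h x)).contains i1 then PySem.Set.add a (h x)
        else if (PySem.Str.split₀ i1).contains (h x) then PySem.Set.add a i1
        else a) acc
      = (l.filterMap (fun x => pvMatch i1 (h x))).foldl PySem.Set.add acc := by
  intro l
  induction l with
  | nil => intro acc; rfl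
  | cons x t ih =>
    intro acc
    simp only [List.foldl_cons, List.filterMap_cons, pvMatch]
    split_ifs with h1 h2 h3
    · exact ih _
    · exact ih _
    · exact ih _
    · exact ih _

lemma pv_foldl_match {β : Type} (i1 : String) (h : β → String) :
    ∀ (l : List β) (acc : PySem.Set String),
      l.foldl (fun a x =>
        match pvMatch i1 (h x) with
        | some m => PySem.Set.add a m
        | none => a) acc
      = (l.filterMap (fun x => pvMatch i1 (h x))).foldl PySem.Set.add acc := by
  intro l
  induction l with
  | nil => intro acc; rfl
  | cons x t ih =>
    intro acc
    rcases hm : pvMatch i1 (h x) with _ | m <;>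
      simp only [List.foldl_cons, List.filterMap_cons, hm] <;> exact ih _

lemma pv_update_ofList (a b : List Int) :
    PySem.Set.update (PySem.Set.ofList a) b = PySem.Set.ofList (a ++ b) := by
  rw [PySem.Set.ofList_eq_foldl, PySem.Set.ofList_eq_foldl, List.foldl_append]; rfl

lemma pv_token_fold (f : String → List Int) (ts : List String) :
    ∀ (L : List Int),
      ts.foldl (fun s t => PySem.Set.update s (f t)) (PySem.Set.ofList L)
        = PySem.Set.ofList (L ++ ts.flatMap f) := by
  induction ts with
  | nil => intro L; simp
  | cons t ts ih =>
    intro L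
    simp only [List.foldl_cons, List.flatMap_cons, pv_update_ofList, ih, List.append_assoc]

lemma pv_filterMap_filter {α β : Type} (f : α → Option β) (l : List α) :
    l.filterMap f = (l.filter (fun x => (f x).isSome)).filterMap f := by
  induction l with
  | nil => rfl
  | cons x t ih =>
    by_cases h : (f x).isSome
    · obtain ⟨b, hb⟩ := Option.isSome_iff_exists.mp h
      simp [hb, ih]
    · simp only [Option.not_isSome_iff_eq_none] at h
      simp [h, ih]

lemma pv_valPos_getD (set2 : List String) (v : String) :
    (pvValPos set2).getD v [] =
      ((((PySem.List.enumerate set2).map (fun q => (q.2, q.1))).filter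
          (fun r => r.1 == v)).map (fun r => r.2)) := by
  have h := PySem.Dict.getD_foldl_modify_append
    ((PySem.List.enumerate set2).map (fun q => (q.2, q.1)))
    (PySem.Dict.empty : PySem.Dict String (List Int)) v
  rw [List.foldl_map] at h
  simpa [pvValPos] using h

lemma pv_mem_valPos (set2 : List String) (v : String) (p : Int) :
    p ∈ (pvValPos set2).getD v [] ↔
      0 ≤ p ∧ p < (set2.length : Int) ∧ PySem.List.pyGetD set2 p "" = v := by
  rw [pv_valPos_getD]
  simp only [List.mem_map, List.mem_filter, PySem.List.mem_enumerate_iff, beq_iff_eq]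
  constructor
  · rintro ⟨a, ⟨⟨a1, ⟨k, hk, rfl⟩, rfl⟩, hbeq⟩, rfl⟩
    simp only at hbeq ⊢
    refine ⟨by omega, by omega, ?_⟩
    rw [PySem.List.pyGetD_eq_getElem set2 "" (by omega) (by omega)]
    simpa using hbeq
  · rintro ⟨h0, h1, hv⟩
    rw [PySem.List.pyGetD_eq_getElem set2 "" h0 h1] at hv
    exact ⟨(set2[p.toNat]'(by omega), 0 + (p.toNat : Int)),
      ⟨⟨(0 + (p.toNat : Int), set2[p.toNat]'(by omega)), ⟨p.toNat, by omega, rfl⟩, rfl⟩, hv⟩,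
      by omega⟩

lemma pv_tokPos_getD (set2 : List String) (t : String) :
    (pvTokPos set2).getD t [] =
      ((((PySem.List.enumerate set2).flatMap
            (fun q => (PySem.Str.split₀ q.2).map (fun tk => (tk, q.1)))).filter
          (fun r => r.1 == t)).map (fun r => r.2)) := by
  have h := PySem.Dict.getD_foldl_modify_append
    ((PySem.List.enumerate set2).flatMap
      (fun q => (PySem.Str.split₀ q.2).map (fun tk => (tk, q.1))))
    (PySem.Dict.empty : PySem.Dict String (List Int)) t
  rw [List.foldl_flatMap] at h
  simp only [List.foldl_map] at h
  simpa [pvTokPos] using h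

lemma pv_mem_tokPos (set2 : List String) (t : String) (p : Int) :
    p ∈ (pvTokPos set2).getD t [] ↔
      0 ≤ p ∧ p < (set2.length : Int) ∧
        t ∈ PySem.Str.split₀ (PySem.List.pyGetD set2 p "") := by
  rw [pv_tokPos_getD]
  simp only [List.mem_map, List.mem_filter, List.mem_flatMap,
    PySem.List.mem_enumerate_iff, beq_iff_eq]
  constructor
  · rintro ⟨a, ⟨⟨a1, ⟨k, hk, rfl⟩, tk, htk, rfl⟩, hbeq⟩, rfl⟩
    simp only at hbeq htk ⊢
    subst hbeq
    refine ⟨by omega, by omega, ?_⟩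
    rw [PySem.List.pyGetD_eq_getElem set2 "" (by omega) (by omega)]
    simpa using htk
  · rintro ⟨h0, h1, hv⟩
    rw [PySem.List.pyGetD_eq_getElem set2 "" h0 h1] at hv
    exact ⟨(t, 0 + (p.toNat : Int)),
      ⟨⟨(0 + (p.toNat : Int), set2[p.toNat]'(by omega)), ⟨p.toNat, by omega, rfl⟩,
        t, hv, rfl⟩, rfl⟩, by omega⟩

lemma pv_inner (set2 : List String) (i1 : String) :
    (PySem.List.sorted
        ((PySem.Str.split₀ i1).foldl
          (fun s t => PySem.Set.update s ((pvValPos set2).getD t []))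
          (PySem.Set.update (PySem.Set.ofList ((pvTokPos set2).getD i1 []))
            ((pvValPos set2).getD i1 [])))
        (fun x => x)).filterMap (fun p => pvMatch i1 (PySem.List.pyGetD set2 p ""))
      = set2.filterMap (pvMatch i1) := by
  set g : Int → Option String := fun p => pvMatch i1 (PySem.List.pyGetD set2 p "") with hg
  set L : List Int :=
    (((pvTokPos set2).getD i1 [] ++ (pvValPos set2).getD i1 []) ++
      (PySem.Str.split₀ i1).flatMap (fun t => (pvValPos set2).getD t [])) with hL
  have hc : (PySem.Str.split₀ i1).foldl
      (fun s t => PySem.Set.update s ((pvValPos set2).getD t []))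
      (PySem.Set.update (PySem.Set.ofList ((pvTokPos set2).getD i1 []))
        ((pvValPos set2).getD i1 []))
      = PySem.Set.ofList L := by
    rw [pv_update_ofList, pv_token_fold]
  rw [hc]
  have hLrange : ∀ p ∈ L, 0 ≤ p ∧ p < (set2.length : Int) := by
    intro p hp
    rw [hL] at hp
    simp only [List.mem_append, List.mem_flatMap] at hp
    rcases hp with (hp | hp) | ⟨t, _, hp⟩
    · exact ⟨((pv_mem_tokPos set2 i1 p).mp hp).1, ((pv_mem_tokPos set2 i1 p).mp hp).2.1⟩
    · exact ⟨((pv_mem_valPos set2 i1 p).mp hp).1, ((pv_mem_valPos set2 i1 p).mp hp).2.1⟩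
    · exact ⟨((pv_mem_valPos set2 t p).mp hp).1, ((pv_mem_valPos set2 t p).mp hp).2.1⟩
  have hLsupp : ∀ p : Int, 0 ≤ p → p < (set2.length : Int) → (g p).isSome → p ∈ L := by
    intro p h0 h1 hs
    rw [hg] at hs
    simp only [pvMatch] at hs
    rw [hL]
    simp only [List.mem_append, List.mem_flatMap]
    split_ifs at hs with e1 e2 e3
    · left; right
      exact (pv_mem_valPos set2 i1 p).mpr ⟨h0, h1, (beq_iff_eq.mp e1).symm⟩
    · left; left
      refine (pv_mem_tokPos set2 i1 p).mpr ⟨h0, h1, ?_⟩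
      simpa using e2
    · right
      refine ⟨PySem.List.pyGetD set2 p "", by simpa using e3,
        (pv_mem_valPos set2 (PySem.List.pyGetD set2 p "") p).mpr ⟨h0, h1, rfl⟩⟩
    · simp at hs
  have hR : set2.filterMap (pvMatch i1)
      = (PySem.List.pyRange 0 (PySem.List.len set2)).filterMap g := by
    conv_lhs => rw [← PySem.List.map_pyGetD_pyRange_zero set2 ""]
    rw [List.filterMap_map]
    rfl
  rw [hR]
  rw [pv_filterMap_filter g, pv_filterMap_filter g (PySem.List.pyRange 0 (PySem.List.len set2))]
  congr 1
  have h1 : (List.filter (fun p => (g p).isSome)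
      (PySem.List.sorted (PySem.Set.ofList L) (fun x => x))).Pairwise (· < ·) :=
    (PySem.List.sorted_ofList_pairwise_lt L).filter _
  have h2 : (List.filter (fun p => (g p).isSome)
      (PySem.List.pyRange 0 (PySem.List.len set2))).Pairwise (· < ·) :=
    (PySem.List.pairwise_lt_pyRange_one 0 _).filter _
  have hperm : (List.filter (fun p => (g p).isSome)
      (PySem.List.sorted (PySem.Set.ofList L) (fun x => x))).Perm
      (List.filter (fun p => (g p).isSome) (PySem.List.pyRange 0 (PySem.List.len set2))) := by
    refine (List.perm_ext_iff_of_nodup (h1.imp (fun h => ne_of_lt h))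
      (h2.imp (fun h => ne_of_lt h))).mpr ?_
    intro p
    simp only [List.mem_filter, PySem.List.mem_sorted, PySem.Set.mem_ofList,
      PySem.List.mem_pyRange_one]
    constructor
    · rintro ⟨hpL, hs⟩
      obtain ⟨hb0, hb1⟩ := hLrange p hpL
      exact ⟨⟨hb0, by simpa using hb1⟩, hs⟩
    · rintro ⟨⟨hb0, hb1⟩, hs⟩
      exact ⟨hLsupp p hb0 (by simpa using hb1) hs, hs⟩
  exact PySem.List.eq_of_perm_of_pairwise_le_of_injective (fun x : Int => x)
    (fun a b h => h) hperm (h1.imp (fun h => le_of_lt h)) (h2.imp (fun h => le_of_lt h))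

-- ===== VERDICT (by name: the statement is the Claim_ definition above) =====
theorem intersection_with_substrings_spec : Claim_equal_intersection_with_substrings := by
  intro set1 set2 _
  unfold Spec_intersection_with_substrings
  unfold intersection_with_substrings intersection_with_substrings_alt
  congr 1
  funext acc i1
  calc set2.foldl (fun result_set item2 =>
        if i1 == item2 then PySem.Set.add result_set i1
        else if (PySem.Str.split₀ item2).contains i1 then PySem.Set.add result_set item2
        else if (PySem.Str.split₀ i1).contains item2 then PySem.Set.add result_set i1
        else result_set) acc
      = (set2.filterMap (fun x => pvMatch i1 x)).foldl PySem.Set.add acc :=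
        pv_foldl_branch i1 (fun x => x) set2 acc
    _ = ((PySem.List.sorted
            ((PySem.Str.split₀ i1).foldl
              (fun s t => PySem.Set.update s ((pvValPos set2).getD t []))
              (PySem.Set.update (PySem.Set.ofList ((pvTokPos set2).getD i1 []))
                ((pvValPos set2).getD i1 [])))
            (fun x => x)).filterMap
              (fun p => pvMatch i1 (PySem.List.pyGetD set2 p ""))).foldl PySem.Set.add acc := by
        rw [pv_inner]
    _ = _ := (pv_foldl_match i1 (fun p => PySem.List.pyGetD set2 p "")
          (PySem.List.sorted
            ((PySem.Str.split₀ i1).foldl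
              (fun s t => PySem.Set.update s ((pvValPos set2).getD t []))
              (PySem.Set.update (PySem.Set.ofList ((pvTokPos set2).getD i1 []))
                ((pvValPos set2).getD i1 [])))
            (fun x => x)) acc).symm
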